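-- pv_equiv track=rewrite | github.com/tahosook/dining-memory-app | scripts/build-review-gallery.py | compute_group_priority
-- ===== SOURCE A (Python) =====
-- from typing import Any, Dict, Iterable, List, Optional, Sequence, Tuple
--
-- GROUP_ORDER = [
--     "unknown",
--     "broad_primary",
--     "side_item_primary",
--     "low_confidence",
--     "scene_dominant",
--     "review",
-- ]
--
-- REVIEW_REASON_SORT_ORDER = {
--     "unknown_primary": 0,
--     "broad_primary": 1,
--     "scene_dominant": 2,
--     "side_item_primary": 3,
--     "low_confidence": 4,
--     "candidate_split": 5,
--     "menu_or_text": 6,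
--     "image_quality_issue": 7,
-- }
--
-- def compute_group_priority(candidate_groups: Sequence[str], review_reasons: Sequence[str], review_priority: int = 99) -> Tuple[int, int, int]:
--     group_ranks = [GROUP_ORDER.index(group) for group in candidate_groups if group in GROUP_ORDER]
--     reason_ranks = [REVIEW_REASON_SORT_ORDER[reason] for reason in review_reasons if reason in REVIEW_REASON_SORT_ORDER]
--     return (
--         review_priority,
--         min(group_ranks) if group_ranks else len(GROUP_ORDER) + 1,
--         min(reason_ranks) if reason_ranks else len(REVIEW_REASON_SORT_ORDER) + 1,
--     )
-- ===== SOURCE B (Python) =====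
-- GROUP_ORDER = [
--     "unknown",
--     "broad_primary",
--     "side_item_primary",
--     "low_confidence",
--     "scene_dominant",
--     "review",
-- ]
--
-- REVIEW_REASON_SORT_ORDER = {
--     "unknown_primary": 0,
--     "broad_primary": 1,
--     "scene_dominant": 2,
--     "side_item_primary": 3,
--     "low_confidence": 4,
--     "candidate_split": 5,
--     "menu_or_text": 6,
--     "image_quality_issue": 7,
-- }
--
-- def compute_group_priority(candidate_groups, review_reasons, review_priority=99):
--     gset = set(candidate_groups)
--     rset = set(review_reasons)
--     g = len(GROUP_ORDER) + 1
--     for i, name in enumerate(GROUP_ORDER):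
--         if name in gset:
--             g = i
--             break
--     r = len(REVIEW_REASON_SORT_ORDER) + 1
--     for key, val in sorted(REVIEW_REASON_SORT_ORDER.items(), key=lambda kv: kv[1]):
--         if key in rset:
--             r = val
--             break
--     return (review_priority, g, r)
-- ===== Notes on version B (the rewrite author's own statement) =====
-- stated objective: alternative
-- what changed: Instead of collecting all matching ranks via list.index/dict lookup per input element and taking min, B builds sets of the inputs once and scans the fixed rank tables in rank order, returning at the first table entry present in the set.
import Mathlib
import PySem

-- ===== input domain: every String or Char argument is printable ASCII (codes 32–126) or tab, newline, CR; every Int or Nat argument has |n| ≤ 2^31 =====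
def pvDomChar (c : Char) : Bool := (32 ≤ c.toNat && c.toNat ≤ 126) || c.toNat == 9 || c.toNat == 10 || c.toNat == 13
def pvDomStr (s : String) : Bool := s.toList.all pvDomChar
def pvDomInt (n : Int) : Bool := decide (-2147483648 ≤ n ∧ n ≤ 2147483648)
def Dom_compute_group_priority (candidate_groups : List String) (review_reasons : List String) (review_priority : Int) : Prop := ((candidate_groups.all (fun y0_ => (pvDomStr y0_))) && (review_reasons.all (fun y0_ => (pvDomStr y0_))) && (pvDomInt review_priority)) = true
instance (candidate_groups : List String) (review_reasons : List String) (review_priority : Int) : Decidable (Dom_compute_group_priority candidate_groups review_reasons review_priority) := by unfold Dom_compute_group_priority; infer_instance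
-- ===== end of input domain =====

-- B replaces A's per-element index/lookup + min with one set build per input and a single
-- in-rank-order scan of the fixed tables, returning at the first entry present (alternative structure).

-- ===== PORT A =====
def GROUP_ORDER : List String :=
  ["unknown", "broad_primary", "side_item_primary", "low_confidence", "scene_dominant", "review"]

def REVIEW_REASON_SORT_ORDER : PySem.Dict String Int :=
  PySem.Dict.mk [("unknown_primary", 0), ("broad_primary", 1), ("scene_dominant", 2),
    ("side_item_primary", 3), ("low_confidence", 4), ("candidate_split", 5),
    ("menu_or_text", 6), ("image_quality_issue", 7)]

def compute_group_priority (candidate_groups : List String) (review_reasons : List String) (review_priority : Int) : Int × Int × Int :=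
  let group_ranks : List Int :=
    (candidate_groups.filter (fun g => GROUP_ORDER.contains g)).map
      (fun g => (((PySem.List.index? GROUP_ORDER g).getD 0 : Nat) : Int))
  let reason_ranks : List Int :=
    (review_reasons.filter (fun r => REVIEW_REASON_SORT_ORDER.contains r)).map
      (fun r => REVIEW_REASON_SORT_ORDER.getD r 0)
  (review_priority,
   match PySem.List.min? group_ranks (fun x => x) with
   | some m => m
   | none => (GROUP_ORDER.length : Int) + 1,
   match PySem.List.min? reason_ranks (fun x => x) with
   | some m => m
   | none => (REVIEW_REASON_SORT_ORDER.size : Int) + 1)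

-- ===== PORT B =====
-- first (key, value) whose key is in the set; else the default (B's loop with break)
def pvScanB (pairs : List (String × Int)) (s : PySem.Set String) (dflt : Int) : Int :=
  match pairs with
  | [] => dflt
  | (k, v) :: rest => if PySem.Set.contains s k then v else pvScanB rest s dflt

def compute_group_priority_alt (candidate_groups : List String) (review_reasons : List String) (review_priority : Int) : Int × Int × Int :=
  let gset : PySem.Set String := PySem.Set.ofList candidate_groups
  let rset : PySem.Set String := PySem.Set.ofList review_reasons
  let g := pvScanB ((PySem.List.enumerate GROUP_ORDER).map (fun p => (p.2, p.1))) gset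
    ((GROUP_ORDER.length : Int) + 1)
  let r := pvScanB (PySem.List.sorted REVIEW_REASON_SORT_ORDER.items (fun kv => kv.2) false) rset
    ((REVIEW_REASON_SORT_ORDER.size : Int) + 1)
  (review_priority, g, r)

-- ===== PRECONDITION & SPEC =====
def Spec_compute_group_priority (candidate_groups : List String) (review_reasons : List String) (review_priority : Int) (out : Int × Int × Int) : Prop := out = compute_group_priority_alt candidate_groups review_reasons review_priority
instance (candidate_groups : List String) (review_reasons : List String) (review_priority : Int) (out : Int × Int × Int) : Decidable (Spec_compute_group_priority candidate_groups review_reasons review_priority out) := by unfold Spec_compute_group_priority; infer_instance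

-- ===== CLAIM (what is proved, stated in full; the proofs are below) =====
def Claim_equal_compute_group_priority : Prop := ∀ (candidate_groups : List String) (review_reasons : List String) (review_priority : Int), Dom_compute_group_priority candidate_groups review_reasons review_priority → Spec_compute_group_priority candidate_groups review_reasons review_priority (compute_group_priority candidate_groups review_reasons review_priority)

-- ===== LEMMAS AND PROOFS =====
def pvGroupPairs : List (String × Int) :=
  [("unknown", 0), ("broad_primary", 1), ("side_item_primary", 2), ("low_confidence", 3),
   ("scene_dominant", 4), ("review", 5)]

def pvReasonPairs : List (String × Int) :=
  [("unknown_primary", 0), ("broad_primary", 1), ("scene_dominant", 2), ("side_item_primary", 3),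
   ("low_confidence", 4), ("candidate_split", 5), ("menu_or_text", 6), ("image_quality_issue", 7)]

def pvLookup (pairs : List (String × Int)) (g : String) : Option Int :=
  (pairs.find? (fun p => p.1 == g)).map (fun p => p.2)

theorem pv_fmf {α β : Type} (p : α → Bool) (f : α → β) (q : α → Option β)
    (hpt : ∀ a, (if p a then some (f a) else none) = q a) (l : List α) :
    (l.filter p).map f = l.filterMap q := by
  induction l with
  | nil => rfl
  | cons a t ih =>
    rw [List.filterMap_cons, ← hpt a, List.filter_cons]
    by_cases h : p a
    · simp [h, ih]
    · simp [h, ih]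

set_option maxRecDepth 8000 in
theorem pv_group_pointwise (g : String) :
    (if GROUP_ORDER.contains g then some (((PySem.List.index? GROUP_ORDER g).getD 0 : Nat) : Int) else none)
      = pvLookup pvGroupPairs g := by
  by_cases h : g ∈ GROUP_ORDER
  · have hc : GROUP_ORDER.contains g = true := by simpa using h
    fin_cases h <;> decide
  · have hc : GROUP_ORDER.contains g = false := by simpa using h
    simp only [GROUP_ORDER, List.mem_cons, List.not_mem_nil, or_false, not_or] at h
    obtain ⟨h1, h2, h3, h4, h5, h6⟩ := h
    have hfind : pvGroupPairs.find? (fun p => p.1 == g) = none := by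
      rw [List.find?_eq_none]
      intro p hp
      simp only [pvGroupPairs, List.mem_cons, List.not_mem_nil, or_false] at hp
      rcases hp with rfl | rfl | rfl | rfl | rfl | rfl <;> simp only [beq_iff_eq] <;>
        intro he <;>
        first
          | exact h1 he.symm | exact h2 he.symm | exact h3 he.symm
          | exact h4 he.symm | exact h5 he.symm | exact h6 he.symm
    rw [if_neg (by rw [hc]; exact Bool.false_ne_true)]
    simp [pvLookup, hfind]

theorem pv_ranksA_group (cgs : List String) :
    (cgs.filter (fun g => GROUP_ORDER.contains g)).map
      (fun g => (((PySem.List.index? GROUP_ORDER g).getD 0 : Nat) : Int))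
    = cgs.filterMap (pvLookup pvGroupPairs) :=
  pv_fmf _ _ _ pv_group_pointwise cgs

set_option maxRecDepth 8000 in
theorem pv_reason_pointwise (r : String) :
    (if REVIEW_REASON_SORT_ORDER.contains r then some (REVIEW_REASON_SORT_ORDER.getD r 0) else none)
      = pvLookup pvReasonPairs r := by
  by_cases h : r ∈ REVIEW_REASON_SORT_ORDER.keys
  · have hc : REVIEW_REASON_SORT_ORDER.contains r = true :=
      (PySem.Dict.contains_iff_mem_keys _ _).2 h
    simp only [REVIEW_REASON_SORT_ORDER, PySem.Dict.keys_mk, List.map_cons, List.map_nil] at h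
    fin_cases h <;> decide
  · have hc : REVIEW_REASON_SORT_ORDER.contains r = false := by
      by_contra hcc
      exact h ((PySem.Dict.contains_iff_mem_keys _ _).1 (by simpa using hcc))
    simp only [REVIEW_REASON_SORT_ORDER, PySem.Dict.keys_mk, List.map_cons, List.map_nil] at h
    simp only [List.mem_cons, List.not_mem_nil, or_false, not_or] at h
    obtain ⟨h1, h2, h3, h4, h5, h6, h7, h8⟩ := h
    have hfind : pvReasonPairs.find? (fun p => p.1 == r) = none := by
      rw [List.find?_eq_none]
      intro p hp
      simp only [pvReasonPairs, List.mem_cons, List.not_mem_nil, or_false] at hp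
      rcases hp with rfl | rfl | rfl | rfl | rfl | rfl | rfl | rfl <;> simp only [beq_iff_eq] <;>
        intro he <;>
        first
          | exact h1 he.symm | exact h2 he.symm | exact h3 he.symm | exact h4 he.symm
          | exact h5 he.symm | exact h6 he.symm | exact h7 he.symm | exact h8 he.symm
    rw [if_neg (by rw [hc]; exact Bool.false_ne_true)]
    simp [pvLookup, hfind]

theorem pv_ranksA_reason (rrs : List String) :
    (rrs.filter (fun r => REVIEW_REASON_SORT_ORDER.contains r)).map
      (fun r => REVIEW_REASON_SORT_ORDER.getD r 0)
    = rrs.filterMap (pvLookup pvReasonPairs) :=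
  pv_fmf _ _ _ pv_reason_pointwise rrs

theorem pv_scan_eq_min (pairs : List (String × Int)) (cgs : List String) (dflt : Int)
    (hsorted : pairs.Pairwise (fun a b => a.2 ≤ b.2)) :
    pvScanB pairs (PySem.Set.ofList cgs) dflt
      = (match PySem.List.min? (cgs.filterMap (pvLookup pairs)) (fun x => x) with
         | some m => m
         | none => dflt) := by
  induction pairs with
  | nil =>
    simp [pvScanB, pvLookup, PySem.List.min?]
  | cons kv rest ih =>
    obtain ⟨k, v⟩ := kv
    rw [List.pairwise_cons] at hsorted
    obtain ⟨hhead, htail⟩ := hsorted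
    by_cases hk : k ∈ cgs
    · have hcont : PySem.Set.contains (PySem.Set.ofList cgs) k = true := by
        simp [PySem.Set.contains, PySem.Set.mem_ofList, hk]
      have hvmem : v ∈ cgs.filterMap (pvLookup ((k, v) :: rest)) := by
        rw [List.mem_filterMap]
        exact ⟨k, hk, by simp [pvLookup]⟩
      have hbound : ∀ x ∈ cgs.filterMap (pvLookup ((k, v) :: rest)), v ≤ x := by
        intro x hx
        rw [List.mem_filterMap] at hx
        obtain ⟨a, _, ha⟩ := hx
        simp only [pvLookup, Option.map_eq_some_iff] at ha
        obtain ⟨p, hp, hpx⟩ := ha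
        have hpm := List.mem_of_find?_eq_some hp
        rcases List.mem_cons.1 hpm with hpe | hpr
        · subst hpe; simp at hpx; omega
        · have := hhead p hpr; omega
      have hne : cgs.filterMap (pvLookup ((k, v) :: rest)) ≠ [] :=
        List.ne_nil_of_mem hvmem
      obtain ⟨m, hm⟩ : ∃ m, PySem.List.min? (cgs.filterMap (pvLookup ((k, v) :: rest))) (fun x => x) = some m := by
        cases hmin : PySem.List.min? (cgs.filterMap (pvLookup ((k, v) :: rest))) (fun x => x) with
        | none => exact absurd ((PySem.List.min?_eq_none_iff _ _).1 hmin) hne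
        | some m => exact ⟨m, rfl⟩
      have hmv : m = v := by
        have h1 := hbound m (PySem.List.min?_mem hm)
        have h2 := PySem.List.min?_isMin hm v hvmem
        omega
      have hstep : pvScanB ((k, v) :: rest) (PySem.Set.ofList cgs) dflt = v := by
        simp only [pvScanB]; rw [if_pos hcont]
      rw [hstep, hm, hmv]
    · have hcont : PySem.Set.contains (PySem.Set.ofList cgs) k = false := by
        simp [PySem.Set.contains, PySem.Set.mem_ofList, hk]
      have hcongr : cgs.filterMap (pvLookup ((k, v) :: rest)) = cgs.filterMap (pvLookup rest) := by
        apply List.filterMap_congr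
        intro a ha
        have hak : (k == a) = false := beq_eq_false_iff_ne.2 (fun he => hk (he ▸ ha))
        simp [pvLookup, List.find?, hak]
      have hstep : pvScanB ((k, v) :: rest) (PySem.Set.ofList cgs) dflt
          = pvScanB rest (PySem.Set.ofList cgs) dflt := by
        simp only [pvScanB]; rw [if_neg (by rw [hcont]; exact Bool.false_ne_true)]
      rw [hstep, hcongr]
      exact ih htail

-- ===== VERDICT (by name: the statement is the Claim_ definition above) =====
theorem compute_group_priority_spec : Claim_equal_compute_group_priority := by
  intro cgs rrs rp _
  unfold Spec_compute_group_priority compute_group_priority compute_group_priority_alt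
  dsimp only
  rw [pv_ranksA_group, pv_ranksA_reason]
  have hg : (PySem.List.enumerate GROUP_ORDER).map (fun p => (p.2, p.1)) = pvGroupPairs := by decide
  have hr : PySem.List.sorted REVIEW_REASON_SORT_ORDER.items (fun kv => kv.2) false = pvReasonPairs := by decide
  rw [hg, hr, pv_scan_eq_min pvGroupPairs cgs _ (by decide), pv_scan_eq_min pvReasonPairs rrs _ (by decide)]
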